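-- pv_equiv track=rewrite | github.com/Soma-Sasaki/python | algorithm/party_solution1.py | chooseTime
-- ===== SOURCE A (Python) =====
-- def chooseTime(times):
--     rcount = 0
--     max_count, time = 0, 0
--     for t in times:
--         if t[1] == "start":
--             rcount += 1
--         elif t[1] == "end":
--             rcount -= 1
--         if (rcount > max_count):
--             max_count = rcount
--             time = t[0]
--     return max_count, time
-- ===== SOURCE B (Python) =====
-- def chooseTime(times):
--     # Two-phase: build the full running-count sequence, then a separate max/argmax pass.
--     counts = []
--     r = 0
--     for _, s in times:
--         r += 1 if s == "start" else (-1 if s == "end" else 0)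
--         counts.append(r)
--     m = max(counts, default=0)
--     if m > 0:
--         return m, times[counts.index(m)][0]
--     return 0, 0
-- ===== Notes on version B (the rewrite author's own statement) =====
-- stated objective: alternative
-- what changed: B splits A's single interleaved loop into two phases: it first materialises the full running-count prefix sequence, then finds its maximum and the first index achieving it in a separate max/argmax pass (returning (0,0) when no positive count exists).
import Mathlib
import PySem

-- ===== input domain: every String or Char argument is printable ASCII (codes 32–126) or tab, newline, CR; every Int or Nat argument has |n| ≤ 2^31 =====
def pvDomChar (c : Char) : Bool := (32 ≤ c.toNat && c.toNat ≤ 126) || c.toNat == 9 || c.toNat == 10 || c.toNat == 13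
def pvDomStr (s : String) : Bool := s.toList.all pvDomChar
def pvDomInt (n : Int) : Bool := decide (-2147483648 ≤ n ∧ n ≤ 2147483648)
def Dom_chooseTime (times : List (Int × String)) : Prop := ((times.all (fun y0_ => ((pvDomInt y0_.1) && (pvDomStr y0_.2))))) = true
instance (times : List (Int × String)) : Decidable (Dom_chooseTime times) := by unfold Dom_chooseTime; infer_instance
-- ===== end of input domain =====

-- B replaces A's interleaved count/max loop by a two-phase decomposition (build the
-- full running-count sequence, then a separate max + first-index pass); same cost.


-- ===== PORT A =====
-- one fold over times with state (rcount, max_count, time), branches in A's order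
def chooseTime (times : List (Int × String)) : Int × Int :=
  let st := times.foldl
    (fun (st : Int × Int × Int) t =>
      let rcount := if t.2 = "start" then st.1 + 1
                    else if t.2 = "end" then st.1 - 1
                    else st.1
      if rcount > st.2.1 then (rcount, rcount, t.1)
      else (rcount, st.2.1, st.2.2))
    (0, 0, 0)
  (st.2.1, st.2.2)

-- ===== PORT B =====
def pvDelta (s : String) : Int :=
  if s = "start" then 1 else if s = "end" then -1 else 0

-- phase 1 of Source B: the running-count prefix sequence (the `counts` list)
def pvCounts : List (Int × String) → Int → List Int
  | [], _ => []
  | t :: ts, r => (r + pvDelta t.2) :: pvCounts ts (r + pvDelta t.2)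

def chooseTime_alt (times : List (Int × String)) : Int × Int :=
  let counts := pvCounts times 0
  let m := (PySem.List.max? counts (fun x => x)).getD 0   -- max(counts, default=0)
  if m > 0 then
    match PySem.List.index? counts m with                  -- counts.index(m)
    | some i =>
      match PySem.List.pyGet? times (i : Int) with         -- times[i]
      | some t => (m, t.1)
      | none => (m, 0)   -- unreachable: index? yields an in-range index
    | none => (m, 0)     -- unreachable: m > 0 implies m ∈ counts
  else (0, 0)

-- ===== PRECONDITION & SPEC =====
def Spec_chooseTime (times : List (Int × String)) (out : Int × Int) : Prop := out = chooseTime_alt times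
instance (times : List (Int × String)) (out : Int × Int) : Decidable (Spec_chooseTime times out) := by unfold Spec_chooseTime; infer_instance

-- ===== CLAIM (what is proved, stated in full; the proofs are below) =====
def Claim_equal_chooseTime : Prop := ∀ (times : List (Int × String)), Dom_chooseTime times → Spec_chooseTime times (chooseTime times)

-- ===== LEMMAS AND PROOFS =====

-- abbreviation for A's loop body
def pvStep (st : Int × Int × Int) (t : Int × String) : Int × Int × Int :=
  let rcount := if t.2 = "start" then st.1 + 1
                else if t.2 = "end" then st.1 - 1
                else st.1
  if rcount > st.2.1 then (rcount, rcount, t.1)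
  else (rcount, st.2.1, st.2.2)

-- the time B reports: first entry whose running count equals M (fallback 0 unused)
def pvFirstAt : List (Int × String) → Int → Int → Int
  | [], _, _ => 0
  | t :: ts, r, M =>
    if r + pvDelta t.2 = M then t.1 else pvFirstAt ts (r + pvDelta t.2) M

theorem pvStep_delta (st : Int × Int × Int) (t : Int × String) :
    pvStep st t = (if st.1 + pvDelta t.2 > st.2.1
                   then (st.1 + pvDelta t.2, st.1 + pvDelta t.2, t.1)
                   else (st.1 + pvDelta t.2, st.2.1, st.2.2)) := by
  simp only [pvStep, pvDelta]
  split_ifs <;> simp_all <;> omega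

theorem pvFoldl_max_max (l : List Int) (a b : Int) :
    l.foldl max (max a b) = max a (l.foldl max b) := by
  induction l generalizing b with
  | nil => simp
  | cons x l ih => simp only [List.foldl_cons, max_assoc, ih]

theorem pvLe_foldl_max (l : List Int) (a : Int) : a ≤ l.foldl max a := by
  induction l generalizing a with
  | nil => simp
  | cons x l ih => exact le_trans (le_max_left a x) (ih _)

-- characterisation of A's fold from an arbitrary state (second/third components)
theorem pvFold_char (ts : List (Int × String)) (r m tm : Int) :
    (ts.foldl pvStep (r, m, tm)).2 =
      ((pvCounts ts r).foldl max m,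
       if (pvCounts ts r).foldl max m > m
       then pvFirstAt ts r ((pvCounts ts r).foldl max m) else tm) := by
  induction ts generalizing r m tm with
  | nil => simp [pvCounts]
  | cons t ts ih =>
    rw [List.foldl_cons, pvStep_delta]
    simp only [pvCounts, List.foldl_cons, pvFirstAt]
    set r' := r + pvDelta t.2 with hr'
    by_cases h : r' > m
    · simp only [if_pos h]
      rw [ih]
      have hmax : max m r' = r' := max_eq_right (le_of_lt h)
      rw [hmax]
      have hle : r' ≤ (pvCounts ts r').foldl max r' := pvLe_foldl_max _ _
      have hgt : (pvCounts ts r').foldl max r' > m := lt_of_lt_of_le h hle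
      rw [if_pos hgt]
      by_cases he : r' = (pvCounts ts r').foldl max r'
      · rw [if_pos he, if_neg (by omega)]
      · rw [if_neg he, if_pos (by omega)]
    · simp only [if_neg h]
      rw [ih]
      have hmax : max m r' = m := max_eq_left (by omega)
      rw [hmax]
      by_cases hg : (pvCounts ts r').foldl max m > m
      · rw [if_pos hg, if_pos hg, if_neg (by omega)]
      · rw [if_neg hg, if_neg hg]

-- B's index/lookup pass recovers pvFirstAt
theorem pvFirstAt_index (ts : List (Int × String)) (r M : Int) (i : Nat)
    (h : PySem.List.index? (pvCounts ts r) M = some i) :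
    ∃ t, PySem.List.pyGet? ts (i : Int) = some t ∧ t.1 = pvFirstAt ts r M := by
  induction ts generalizing r i with
  | nil => simp [pvCounts, PySem.List.index?] at h
  | cons t ts ih =>
    simp only [pvCounts] at h
    by_cases he : r + pvDelta t.2 = M
    · subst he
      rw [PySem.List.index?_cons_self] at h
      cases h
      exact ⟨t, by simp [PySem.List.pyGet?, PySem.List.pyIdx?], by simp [pvFirstAt]⟩
    · rw [PySem.List.index?_cons_of_ne _ he] at h
      cases hj : PySem.List.index? (pvCounts ts (r + pvDelta t.2)) M with
      | none => rw [hj] at h; simp at h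
      | some j =>
        rw [hj] at h
        simp only [Option.map_some] at h
        cases h
        obtain ⟨u, hu, hu1⟩ := ih _ _ hj
        refine ⟨u, ?_, by simp [pvFirstAt, if_neg he, hu1]⟩
        have : ((j + 1 : Nat) : Int) = (j : Int) + 1 := by push_cast; ring
        rw [this, PySem.List.pyGet?_cons_succ]
        exact hu

-- A's result in closed form
theorem chooseTime_eq (ts : List (Int × String)) :
    chooseTime ts =
      ((pvCounts ts 0).foldl max 0,
       if (pvCounts ts 0).foldl max 0 > 0
       then pvFirstAt ts 0 ((pvCounts ts 0).foldl max 0) else 0) := by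
  have : chooseTime ts = (ts.foldl pvStep (0, 0, 0)).2 := rfl
  rw [this, pvFold_char]

-- ===== VERDICT (by name: the statement is the Claim_ definition above) =====
theorem chooseTime_spec : Claim_equal_chooseTime := by
  intro ts _
  show chooseTime ts = chooseTime_alt ts
  rw [chooseTime_eq]
  simp only [chooseTime_alt]
  cases hc : pvCounts ts 0 with
  | nil => simp [PySem.List.max?]
  | cons c rest =>
    rw [PySem.List.max?_id_cons, Option.getD_some]
    have hM : (c :: rest).foldl max 0 = max 0 (rest.foldl max c) := by
      rw [List.foldl_cons, pvFoldl_max_max]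
    by_cases hpos : rest.foldl max c > 0
    · have hmem : rest.foldl max c ∈ (c :: rest) :=
        PySem.List.max?_mem (PySem.List.max?_id_cons c rest)
      obtain ⟨i, hi⟩ := Option.isSome_iff_exists.mp
        (((PySem.List.index?_isSome_iff _ _).mpr hmem))
      obtain ⟨t, ht, ht1⟩ := pvFirstAt_index ts 0 _ i (by rw [hc]; exact hi)
      simp only [if_pos hpos, hi, ht]
      rw [hM, max_eq_right (le_of_lt hpos), if_pos hpos, ht1]
    · rw [if_neg hpos, hM, max_eq_left (by omega), if_neg (by omega)]
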